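-- pv_equiv track=rewrite | github.com/we260/Mutation-Bias | 4_Strand_biases.py | get_recomb_positions
-- ===== SOURCE A (Python) =====
-- def get_recomb_positions(suspicious_snvs, target_contig, window_length=2000):
--     all_positions = []
--     for sample in suspicious_snvs:
--         for chrom, pos in suspicious_snvs[sample]:
--             if chrom == target_contig or target_contig in chrom or chrom in target_contig:
--                 all_positions.append(pos)
--     if not all_positions:
--         return set()
--     all_positions = sorted(set(all_positions))
--     spans = []
--     region_start = all_positions[0]
--     region_end = all_positions[0]
--     for p in all_positions[1:]:
--         if p - region_end <= window_length:
--             region_end = p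
--         else:
--             spans.append((region_start, region_end))
--             region_start = p
--             region_end = p
--     spans.append((region_start, region_end))
--
--     recomb_set = set()
--     for start, end in spans:
--         for p in range(start, end + 1):
--             recomb_set.add(p)
--     return recomb_set
-- ===== SOURCE B (Python) =====
-- def get_recomb_positions(suspicious_snvs, target_contig, window_length=2000):
--     all_positions = []
--     for sample in suspicious_snvs:
--         for chrom, pos in suspicious_snvs[sample]:
--             if chrom == target_contig or target_contig in chrom or chrom in target_contig:
--                 all_positions.append(pos)
--     if not all_positions:
--         return set()
--     recomb_set = set()
--     prev = None
--     for p in sorted(set(all_positions)):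
--         if prev is not None and p - prev <= window_length:
--             recomb_set.update(range(prev + 1, p + 1))
--         else:
--             recomb_set.add(p)
--         prev = p
--     return recomb_set
-- ===== Notes on version B (the rewrite author's own statement) =====
-- stated objective: simpler
-- what changed: B drops A's intermediate spans list and region_start/region_end merge loop: after the same collection/sort prelude it does one gap-filling pass over consecutive sorted unique positions, adding each position and filling the integers of any gap within window_length directly into the result set.
import Mathlib
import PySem

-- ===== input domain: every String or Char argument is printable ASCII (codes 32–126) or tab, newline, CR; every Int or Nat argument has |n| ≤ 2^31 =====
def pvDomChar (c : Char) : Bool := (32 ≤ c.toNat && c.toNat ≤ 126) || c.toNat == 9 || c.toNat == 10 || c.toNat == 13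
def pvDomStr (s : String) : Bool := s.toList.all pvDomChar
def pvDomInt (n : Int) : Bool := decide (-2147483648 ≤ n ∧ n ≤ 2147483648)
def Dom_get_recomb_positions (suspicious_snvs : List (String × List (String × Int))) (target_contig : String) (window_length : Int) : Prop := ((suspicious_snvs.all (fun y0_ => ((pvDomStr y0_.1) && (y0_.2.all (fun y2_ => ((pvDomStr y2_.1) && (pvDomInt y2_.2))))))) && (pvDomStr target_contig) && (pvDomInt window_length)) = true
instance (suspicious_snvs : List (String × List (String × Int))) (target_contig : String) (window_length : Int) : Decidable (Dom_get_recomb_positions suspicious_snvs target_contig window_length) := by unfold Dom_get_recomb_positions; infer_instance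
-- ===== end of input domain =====

-- B fuses A's span-merging loop and span-expansion loop into one gap-filling pass over the
-- sorted unique positions, with no intermediate spans list (objective: simpler; same cost).

-- ===== PORT A =====
def get_recomb_positions (suspicious_snvs : List (String × List (String × Int))) (target_contig : String) (window_length : Int) : List Int :=
  let d := PySem.Dict.ofList suspicious_snvs
  let all_positions : List Int :=
    d.items.foldl (fun acc kv =>
      kv.2.foldl (fun acc cp =>
        if cp.1 == target_contig || PySem.Str.isIn target_contig cp.1 || PySem.Str.isIn cp.1 target_contig
        then acc ++ [cp.2] else acc) acc) []
  if all_positions = [] then [] else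
  match PySem.List.sorted (PySem.Set.ofList all_positions) (fun x => x) false with
  | [] => []  -- unreachable: all_positions ≠ []
  | a0 :: rest =>
    let st := rest.foldl (fun (st : List (Int × Int) × Int × Int) p =>
        if p - st.2.2 ≤ window_length then (st.1, st.2.1, p)
        else (st.1 ++ [(st.2.1, st.2.2)], p, p)) ([], a0, a0)
    let spans := st.1 ++ [(st.2.1, st.2.2)]
    spans.foldl (fun s se => (PySem.List.pyRange se.1 (se.2 + 1) 1).foldl PySem.Set.add s)
      PySem.Set.empty

-- ===== PORT B =====
def get_recomb_positions_alt (suspicious_snvs : List (String × List (String × Int))) (target_contig : String) (window_length : Int) : List Int :=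
  let d := PySem.Dict.ofList suspicious_snvs
  let all_positions : List Int :=
    d.items.foldl (fun acc kv =>
      kv.2.foldl (fun acc cp =>
        if cp.1 == target_contig || PySem.Str.isIn target_contig cp.1 || PySem.Str.isIn cp.1 target_contig
        then acc ++ [cp.2] else acc) acc) []
  if all_positions = [] then [] else
  ((PySem.List.sorted (PySem.Set.ofList all_positions) (fun x => x) false).foldl
    (fun (st : PySem.Set Int × Option Int) p =>
      match st.2 with
      | some prev =>
          if p - prev ≤ window_length
          then ((PySem.List.pyRange (prev + 1) (p + 1) 1).foldl PySem.Set.add st.1, some p)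
          else (PySem.Set.add st.1 p, some p)
      | none => (PySem.Set.add st.1 p, some p))
    (PySem.Set.empty, none)).1

-- ===== PRECONDITION & SPEC =====
def Spec_get_recomb_positions (suspicious_snvs : List (String × List (String × Int))) (target_contig : String) (window_length : Int) (out : List Int) : Prop := out = get_recomb_positions_alt suspicious_snvs target_contig window_length
instance (suspicious_snvs : List (String × List (String × Int))) (target_contig : String) (window_length : Int) (out : List Int) : Decidable (Spec_get_recomb_positions suspicious_snvs target_contig window_length out) := by unfold Spec_get_recomb_positions; infer_instance

-- ===== CLAIM (what is proved, stated in full; the proofs are below) =====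
def Claim_equal_get_recomb_positions : Prop := ∀ (suspicious_snvs : List (String × List (String × Int))) (target_contig : String) (window_length : Int), Dom_get_recomb_positions suspicious_snvs target_contig window_length → Spec_get_recomb_positions suspicious_snvs target_contig window_length (get_recomb_positions suspicious_snvs target_contig window_length)

-- ===== LEMMAS AND PROOFS =====

-- reference expansion of A's merge-then-expand phase
def pvExpand (w rs re : Int) : List Int → List Int
  | [] => PySem.List.pyRange rs (re + 1) 1
  | p :: t => if p - re ≤ w then pvExpand w rs p t
              else PySem.List.pyRange rs (re + 1) 1 ++ pvExpand w p p t

-- reference expansion of B's gap-filling loop (after the first element)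
def pvGo (w prev : Int) : List Int → List Int
  | [] => []
  | p :: t => if p - prev ≤ w then PySem.List.pyRange (prev + 1) (p + 1) 1 ++ pvGo w p t
              else p :: pvGo w p t

theorem pv_add_fresh (s : List Int) (x : Int) (hx : x ∉ s) :
    PySem.Set.add s x = s ++ [x] := by
  simp [PySem.Set.add, PySem.Set.contains]
  intro hmem; exact absurd hmem hx

theorem pv_foldl_add_eq_append (l : List Int) : ∀ s : List Int, (s ++ l).Nodup →
    l.foldl PySem.Set.add s = s ++ l := by
  induction l with
  | nil => intro s _; simp
  | cons x t ih =>
    intro s h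
    have hx : x ∉ s := fun hxs => (List.nodup_append.mp h).2.2 x hxs x (by simp) rfl
    have h' : ((s ++ [x]) ++ t).Nodup := by simpa using h
    simp only [List.foldl_cons, pv_add_fresh s x hx]
    rw [ih (s ++ [x]) h']
    simp

theorem pvExpand_lb (w : Int) : ∀ (t : List Int) (rs re y : Int), rs ≤ re →
    (re :: t).Pairwise (· < ·) → y ∈ pvExpand w rs re t → rs ≤ y := by
  intro t
  induction t with
  | nil =>
    intro rs re y hle _ hy
    simp [pvExpand, PySem.List.mem_pyRange_one] at hy
    exact hy.1
  | cons p t ih =>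
    intro rs re y hle hch hy
    have hrep : re < p := (List.pairwise_cons.mp hch).1 p (by simp)
    have hch' : (p :: t).Pairwise (· < ·) := (List.pairwise_cons.mp hch).2
    simp only [pvExpand] at hy
    split at hy
    · exact ih rs p y (by omega) hch' hy
    · rcases List.mem_append.mp hy with h1 | h2
      · exact ((PySem.List.mem_pyRange_one).mp h1).1
      · have := ih p p y le_rfl hch' h2
        omega

theorem pvExpand_pairwise (w : Int) : ∀ (t : List Int) (rs re : Int), rs ≤ re →
    (re :: t).Pairwise (· < ·) → (pvExpand w rs re t).Pairwise (· < ·) := by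
  intro t
  induction t with
  | nil =>
    intro rs re _ _
    simp only [pvExpand]
    exact PySem.List.pairwise_lt_pyRange_one _ _
  | cons p t ih =>
    intro rs re hle hch
    have hrep : re < p := (List.pairwise_cons.mp hch).1 p (by simp)
    have hch' : (p :: t).Pairwise (· < ·) := (List.pairwise_cons.mp hch).2
    simp only [pvExpand]
    split
    · exact ih rs p (by omega) hch'
    · refine List.pairwise_append.mpr ⟨PySem.List.pairwise_lt_pyRange_one _ _, ih p p le_rfl hch', ?_⟩
      intro a ha b hb
      have ha' : a < re + 1 := ((PySem.List.mem_pyRange_one).mp ha).2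
      have hb' : p ≤ b := pvExpand_lb w t p p b le_rfl hch' hb
      omega

theorem pvExpand_eq_go (w : Int) : ∀ (t : List Int) (rs re : Int), rs ≤ re →
    (re :: t).Pairwise (· < ·) →
    pvExpand w rs re t = PySem.List.pyRange rs (re + 1) 1 ++ pvGo w re t := by
  intro t
  induction t with
  | nil => intro rs re _ _; simp [pvExpand, pvGo]
  | cons p t ih =>
    intro rs re hle hch
    have hrep : re < p := (List.pairwise_cons.mp hch).1 p (by simp)
    have hch' : (p :: t).Pairwise (· < ·) := (List.pairwise_cons.mp hch).2
    simp only [pvExpand, pvGo]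
    split
    · rw [ih rs p (by omega) hch']
      rw [PySem.List.pyRange_one_append rs (re + 1) (p + 1) (by omega) (by omega)]
      simp
    · rw [ih p p le_rfl hch']
      rw [PySem.List.pyRange_one_singleton]
      simp

-- A's merge fold, flattened, is pvExpand
theorem pvA_fold (w : Int) : ∀ (t : List Int) (spans : List (Int × Int)) (rs re : Int),
    (((t.foldl (fun (st : List (Int × Int) × Int × Int) p =>
        if p - st.2.2 ≤ w then (st.1, st.2.1, p)
        else (st.1 ++ [(st.2.1, st.2.2)], p, p)) (spans, rs, re)).1
      ++ [((t.foldl (fun (st : List (Int × Int) × Int × Int) p =>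
        if p - st.2.2 ≤ w then (st.1, st.2.1, p)
        else (st.1 ++ [(st.2.1, st.2.2)], p, p)) (spans, rs, re)).2.1,
           (t.foldl (fun (st : List (Int × Int) × Int × Int) p =>
        if p - st.2.2 ≤ w then (st.1, st.2.1, p)
        else (st.1 ++ [(st.2.1, st.2.2)], p, p)) (spans, rs, re)).2.2)]).flatMap
        (fun se => PySem.List.pyRange se.1 (se.2 + 1) 1))
    = spans.flatMap (fun se => PySem.List.pyRange se.1 (se.2 + 1) 1) ++ pvExpand w rs re t := by
  intro t
  induction t with
  | nil => intro spans rs re; simp [pvExpand]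
  | cons p t ih =>
    intro spans rs re
    simp only [List.foldl_cons, pvExpand]
    by_cases hc : p - re ≤ w
    · simp only [if_pos hc]; exact ih spans rs p
    · simp only [if_neg hc]
      rw [ih (spans ++ [(rs, re)]) p p]
      simp

-- A's span-expansion fold is flatMap (given global freshness)
theorem pvA_expandFold : ∀ (spans : List (Int × Int)) (s : List Int),
    (s ++ spans.flatMap (fun se => PySem.List.pyRange se.1 (se.2 + 1) 1)).Nodup →
    spans.foldl (fun s se => (PySem.List.pyRange se.1 (se.2 + 1) 1).foldl PySem.Set.add s) s
      = s ++ spans.flatMap (fun se => PySem.List.pyRange se.1 (se.2 + 1) 1) := by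
  intro spans
  induction spans with
  | nil => intro s _; simp
  | cons se t ih =>
    intro s h
    simp only [List.flatMap_cons] at h ⊢
    rw [List.foldl_cons,
        pv_foldl_add_eq_append _ s (h.sublist (by simp : (s ++ PySem.List.pyRange se.1 (se.2 + 1) 1).Sublist (s ++ (PySem.List.pyRange se.1 (se.2 + 1) 1 ++ t.flatMap (fun se => PySem.List.pyRange se.1 (se.2 + 1) 1))))),
        ih (s ++ PySem.List.pyRange se.1 (se.2 + 1) 1) (by simpa [List.append_assoc] using h)]
    simp

-- A's whole tail phase equals pvExpand
theorem pvA_total (w : Int) (t : List Int) (rs re : Int)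
    (h : (pvExpand w rs re t).Nodup) :
    ((t.foldl (fun (st : List (Int × Int) × Int × Int) p =>
        if p - st.2.2 ≤ w then (st.1, st.2.1, p)
        else (st.1 ++ [(st.2.1, st.2.2)], p, p)) (([] : List (Int × Int)), rs, re)).1
      ++ [((t.foldl (fun (st : List (Int × Int) × Int × Int) p =>
        if p - st.2.2 ≤ w then (st.1, st.2.1, p)
        else (st.1 ++ [(st.2.1, st.2.2)], p, p)) (([] : List (Int × Int)), rs, re)).2.1,
           (t.foldl (fun (st : List (Int × Int) × Int × Int) p =>
        if p - st.2.2 ≤ w then (st.1, st.2.1, p)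
        else (st.1 ++ [(st.2.1, st.2.2)], p, p)) (([] : List (Int × Int)), rs, re)).2.2)]).foldl
      (fun s se => (PySem.List.pyRange se.1 (se.2 + 1) 1).foldl PySem.Set.add s)
      PySem.Set.empty
    = pvExpand w rs re t := by
  have hA := pvA_fold w t [] rs re
  simp only [List.flatMap_nil, List.nil_append] at hA
  rw [pvA_expandFold _ PySem.Set.empty
      (by rw [show (PySem.Set.empty : List Int) = [] from rfl, List.nil_append, hA]; exact h)]
  rw [show (PySem.Set.empty : List Int) = [] from rfl, List.nil_append, hA]

-- B's fold is pvGo (given freshness)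
theorem pvB_fold (w : Int) : ∀ (t : List Int) (prev : Int) (s : List Int),
    (s ++ pvGo w prev t).Nodup →
    (t.foldl (fun (st : PySem.Set Int × Option Int) p =>
      match st.2 with
      | some prev =>
          if p - prev ≤ w
          then ((PySem.List.pyRange (prev + 1) (p + 1) 1).foldl PySem.Set.add st.1, some p)
          else (PySem.Set.add st.1 p, some p)
      | none => (PySem.Set.add st.1 p, some p)) (s, some prev)).1 = s ++ pvGo w prev t := by
  intro t
  induction t with
  | nil => intro prev s _; simp [pvGo]
  | cons p t ih =>
    intro prev s h
    simp only [List.foldl_cons]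
    by_cases hc : p - prev ≤ w
    · simp only [pvGo, if_pos hc] at h ⊢
      have hpre : (s ++ PySem.List.pyRange (prev + 1) (p + 1) 1).Nodup :=
        h.sublist (by simp)
      rw [pv_foldl_add_eq_append _ s hpre]
      rw [ih p (s ++ PySem.List.pyRange (prev + 1) (p + 1) 1) (by simpa [List.append_assoc] using h)]
      simp
    · simp only [pvGo, if_neg hc] at h ⊢
      have hp : p ∉ s := fun hps => (List.nodup_append.mp h).2.2 p hps p (by simp) rfl
      rw [pv_add_fresh s p hp, ih p (s ++ [p]) (by simpa using h)]
      simp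

-- ===== VERDICT (by name: the statement is the Claim_ definition above) =====
theorem get_recomb_positions_spec : Claim_equal_get_recomb_positions := by
  intro snvs tc w _
  simp only [Spec_get_recomb_positions, get_recomb_positions, get_recomb_positions_alt]
  set ps : List Int :=
    (PySem.Dict.ofList snvs).items.foldl (fun acc kv =>
      kv.2.foldl (fun acc cp =>
        if cp.1 == tc || PySem.Str.isIn tc cp.1 || PySem.Str.isIn cp.1 tc
        then acc ++ [cp.2] else acc) acc) [] with hps
  by_cases hempty : ps = []
  · simp [hempty]
  · simp only [if_neg hempty]
    have hch : (PySem.List.sorted (PySem.Set.ofList ps) (fun x => x) false).Pairwise (· < ·) :=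
      PySem.List.sorted_ofList_pairwise_lt ps
    cases haps : PySem.List.sorted (PySem.Set.ofList ps) (fun x => x) false with
    | nil => rfl
    | cons a0 rest =>
      rw [haps] at hch
      dsimp only
      have hexp_pw : (pvExpand w a0 a0 rest).Pairwise (· < ·) :=
        pvExpand_pairwise w rest a0 a0 le_rfl hch
      have hexp_nd : (pvExpand w a0 a0 rest).Nodup :=
        hexp_pw.imp (fun h => ne_of_lt h)
      have heg : pvExpand w a0 a0 rest = a0 :: pvGo w a0 rest := by
        rw [pvExpand_eq_go w rest a0 a0 le_rfl hch, PySem.List.pyRange_one_singleton]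
        simp
      have hgo_nd : (([a0] : List Int) ++ pvGo w a0 rest).Nodup := by
        have h1 : ([a0] : List Int) ++ pvGo w a0 rest = pvExpand w a0 a0 rest := by
          rw [heg]; simp
        rw [h1]; exact hexp_nd
      have hadd0 : PySem.Set.add (PySem.Set.empty : PySem.Set Int) a0 = [a0] := by
        simp [PySem.Set.add, PySem.Set.contains, PySem.Set.empty]
      rw [pvA_total w rest a0 a0 hexp_nd]
      simp only [List.foldl_cons, hadd0]
      rw [pvB_fold w rest a0 [a0] hgo_nd, heg]
      simp
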